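-- pv_equiv track=rewrite | github.com/salesforce/botsim | botsim/botsim_utils/clana/clustering.py | apply_grouping
-- ===== SOURCE A (Python) =====
-- def apply_grouping(labels, grouping):
--     """
--     Return list of grouped labels.
--
--     Parameters
--     ----------
--     labels : List[T]
--     grouping : List[bool]
--
--     Returns
--     -------
--     grouped_labels
--
--     Examples
--     --------
--     >>> labels = ['de', 'en', 'fr']
--     >>> grouping = [False, True]
--     >>> apply_grouping(labels, grouping)
--     [['de', 'en'], ['fr']]
--     """
--     groups = []
--     current_group = [labels[0]]
--     for label, cut in zip(labels[1:], grouping):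
--         if cut:
--             groups.append(current_group)
--             current_group = [label]
--         else:
--             current_group.append(label)
--     groups.append(current_group)
--     return groups
-- ===== SOURCE B (Python) =====
-- def apply_grouping(labels, grouping):
--     n = min(len(labels), len(grouping) + 1)
--     cuts = [i + 1 for i, c in enumerate(grouping[:n - 1]) if c]
--     bounds = [0] + cuts + [n]
--     return [labels[a:b] for a, b in zip(bounds, bounds[1:])]
-- ===== Notes on version B (the rewrite author's own statement) =====
-- stated objective: alternative
-- what changed: B computes the cut boundary indices first and slices labels between consecutive boundaries, instead of A's single scan that accumulates a current_group and flushes it at each cut.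
-- outside the precondition, e.g. on apply_grouping([], []): A raises IndexError, B returns [[]]
import Mathlib
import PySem

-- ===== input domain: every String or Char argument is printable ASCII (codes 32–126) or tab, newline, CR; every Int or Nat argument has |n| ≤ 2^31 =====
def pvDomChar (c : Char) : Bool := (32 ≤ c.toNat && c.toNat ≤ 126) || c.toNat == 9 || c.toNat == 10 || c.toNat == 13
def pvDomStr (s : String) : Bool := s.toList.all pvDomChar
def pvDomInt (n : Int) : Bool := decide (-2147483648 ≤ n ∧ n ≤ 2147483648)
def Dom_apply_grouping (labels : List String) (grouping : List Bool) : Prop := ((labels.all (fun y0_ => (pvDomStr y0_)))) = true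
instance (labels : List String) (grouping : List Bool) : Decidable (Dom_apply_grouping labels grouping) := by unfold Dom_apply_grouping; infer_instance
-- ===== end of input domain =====

-- B replaces A's accumulator loop by computing cut boundaries and slicing labels between
-- consecutive boundaries (objective: alternative decomposition, same cost).

-- ===== PORT A =====
def apply_grouping (labels : List String) (grouping : List Bool) : List (List String) :=
  match PySem.List.pyGet? labels 0 with
  | none => []   -- labels[0] raises IndexError in Python; excluded by Pre_
  | some l0 =>
    let p := (List.zip (PySem.List.slice labels (some 1) none) grouping).foldl
      (fun (st : List (List String) × List String) lc =>
        if lc.2 then (st.1 ++ [st.2], [lc.1]) else (st.1, st.2 ++ [lc.1]))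
      ([], [l0])
    p.1 ++ [p.2]

-- ===== PORT B =====
def apply_grouping_alt (labels : List String) (grouping : List Bool) : List (List String) :=
  let n : Int := min (labels.length : Int) ((grouping.length : Int) + 1)
  let cuts : List Int :=
    (PySem.List.enumerate (PySem.List.slice grouping none (some (n - 1)))).filterMap
      (fun ic => if ic.2 then some (ic.1 + 1) else none)
  let bounds : List Int := 0 :: (cuts ++ [n])
  (List.zip bounds (PySem.List.slice bounds (some 1) none)).map
    (fun ab => PySem.List.slice labels (some ab.1) (some ab.2))

-- ===== PRECONDITION & SPEC =====
-- Pre_ excludes empty labels, on which Python A raises IndexError (labels[0]).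
def Pre_apply_grouping (labels : List String) (grouping : List Bool) : Prop := labels ≠ []
instance (labels : List String) (grouping : List Bool) : Decidable (Pre_apply_grouping labels grouping) := by unfold Pre_apply_grouping; infer_instance
def pvWitness_apply_grouping : List String × List Bool := (["de", "en", "fr"], [false, true])

def Spec_apply_grouping (labels : List String) (grouping : List Bool) (out : List (List String)) : Prop := out = apply_grouping_alt labels grouping
instance (labels : List String) (grouping : List Bool) (out : List (List String)) : Decidable (Spec_apply_grouping labels grouping out) := by unfold Spec_apply_grouping; infer_instance

-- ===== CLAIM (what is proved, stated in full; the proofs are below) =====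
def Claim_equal_apply_grouping : Prop := ∀ (labels : List String) (grouping : List Bool), Dom_apply_grouping labels grouping → Pre_apply_grouping labels grouping → Spec_apply_grouping labels grouping (apply_grouping labels grouping)

-- ===== LEMMAS AND PROOFS =====

/-- Canonical "split at cut flags": the common shape of both programs' results. -/
def pvSplit (cur : List String) : List (String × Bool) → List (List String)
  | [] => [cur]
  | (l, c) :: ps => if c then cur :: pvSplit [l] ps else pvSplit (cur ++ [l]) ps

def pvCuts (base : Int) : List Bool → List Int
  | [] => []
  | c :: fs => if c then base :: pvCuts (base + 1) fs else pvCuts (base + 1) fs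

lemma pvSliceChunk (L cur rest : List String) (a : Nat) (b : Int)
    (hdrop : L.drop a = cur ++ rest) (hb : b = (a : Int) + cur.length) :
    PySem.List.slice L (some (a : Int)) (some b) = cur := by
  have h : b = ((a + cur.length : Nat) : Int) := by push_cast; omega
  rw [h, PySem.List.slice_natCast, hdrop]
  simp [List.take_left]

lemma pvB_core (fs : List Bool) :
    ∀ (cur xs rest L : List String) (a : Nat) (base e : Int),
      L.drop a = cur ++ xs ++ rest →
      fs.length = xs.length →
      base = (a : Int) + cur.length →
      e = (a : Int) + cur.length + xs.length →
      (List.zip ((a : Int) :: (pvCuts base fs ++ [e])) (pvCuts base fs ++ [e])).map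
        (fun ab => PySem.List.slice L (some ab.1) (some ab.2))
      = pvSplit cur (List.zip xs fs) := by
  induction fs with
  | nil =>
    intro cur xs rest L a base e hdrop hlen hbase he
    have hxs : xs = [] := by
      cases xs with
      | nil => rfl
      | cons x xs => simp at hlen
    subst hxs
    simp only [List.nil_append, List.append_nil] at hdrop he ⊢
    simp only [pvCuts, List.nil_append, List.zip_cons_cons, List.zip_nil_right,
      List.map_cons, List.map_nil, List.zip_nil_left, pvSplit]
    rw [pvSliceChunk L cur rest a e hdrop (by simpa using he)]
  | cons c fs ih =>
    intro cur xs rest L a base e hdrop hlen hbase he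
    cases xs with
    | nil => simp at hlen
    | cons x xs' =>
      have hdrop' : L.drop (a + cur.length) = x :: (xs' ++ rest) := by
        have h2 := congrArg (List.drop cur.length) hdrop
        rw [List.drop_drop] at h2
        simpa [List.drop_left, Nat.add_comm cur.length a] using h2
      have hb2 : base = ((a + cur.length : Nat) : Int) := by push_cast; omega
      cases c with
      | true =>
        simp only [pvCuts, if_true, List.cons_append, List.zip_cons_cons, List.map_cons,
          pvSplit]
        rw [pvSliceChunk L cur (x :: (xs' ++ rest)) a base (by rw [hdrop]; simp) hbase]
        rw [hb2]
        exact congrArg (cur :: ·) (ih [x] xs' rest L (a + cur.length) (((a + cur.length : Nat) : Int) + 1) e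
          (by simpa using hdrop')
          (by simpa using hlen)
          (by norm_num)
          (by simp only [List.length_cons, List.length_nil] at he ⊢; push_cast at he ⊢; omega))
      | false =>
        simp only [pvCuts, Bool.false_eq_true, if_false, pvSplit]
        exact ih (cur ++ [x]) xs' rest L a (base + 1) e
          (by simpa using hdrop)
          (by simpa using hlen)
          (by simp only [hbase, List.length_append, List.length_cons, List.length_nil]; push_cast; ring)
          (by simp only [List.length_cons, List.length_append, List.length_nil] at he ⊢; push_cast at he ⊢; omega)
lemma pvA_fold (ps : List (String × Bool)) :
    ∀ (groups : List (List String)) (cur : List String),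
      (ps.foldl
        (fun (st : List (List String) × List String) lc =>
          if lc.2 then (st.1 ++ [st.2], [lc.1]) else (st.1, st.2 ++ [lc.1]))
        (groups, cur)).1
      ++ [(ps.foldl
        (fun (st : List (List String) × List String) lc =>
          if lc.2 then (st.1 ++ [st.2], [lc.1]) else (st.1, st.2 ++ [lc.1]))
        (groups, cur)).2]
      = groups ++ pvSplit cur ps := by
  induction ps with
  | nil => intro groups cur; simp [pvSplit]
  | cons p ps ih =>
    intro groups cur
    obtain ⟨l, c⟩ := p
    cases c <;> simp [pvSplit, List.foldl_cons, ih]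

lemma pvCuts_enum (fs : List Bool) : ∀ (s : Int),
    (PySem.List.enumerate fs s).filterMap (fun ic => if ic.2 then some (ic.1 + 1) else none)
      = pvCuts (s + 1) fs := by
  induction fs with
  | nil => intro s; simp [PySem.List.enumerate_nil, pvCuts]
  | cons c fs ih =>
    intro s
    cases c <;> simp [PySem.List.enumerate_cons, pvCuts, ih] <;> ring_nf

lemma pvZip_take (l1 : List String) (l2 : List Bool) :
    List.zip l1 l2
      = List.zip (l1.take (min l1.length l2.length)) (l2.take (min l1.length l2.length)) := by
  induction l1 generalizing l2 with
  | nil => simp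
  | cons a l1 ih =>
    cases l2 with
    | nil => simp
    | cons b l2 =>
      simp only [List.length_cons, Nat.succ_min_succ, List.take_succ_cons, List.zip_cons_cons]
      rw [← ih]

-- ===== VERDICT (by name: the statement is the Claim_ definition above) =====
theorem apply_grouping_spec : Claim_equal_apply_grouping := by
  intro labels grouping _ hpre
  unfold Spec_apply_grouping
  show apply_grouping labels grouping = apply_grouping_alt labels grouping
  cases labels with
  | nil => exact absurd rfl hpre
  | cons l0 ls =>
    set m : Nat := min ls.length grouping.length with hm
    -- A side
    have hA : apply_grouping (l0 :: ls) grouping = pvSplit [l0] (List.zip ls grouping) := by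
      show (match PySem.List.pyGet? (l0 :: ls) 0 with
        | none => []
        | some l0 => _) = _
      rw [show PySem.List.pyGet? (l0 :: ls) 0 = some l0 from by
        simp [PySem.List.pyGet?, PySem.List.pyIdx?]]
      simp only [PySem.List.slice_from_one, List.tail_cons]
      exact pvA_fold (List.zip ls grouping) [] [l0]
    -- B side
    have hn : min ((l0 :: ls).length : Int) ((grouping.length : Int) + 1) = ((m + 1 : Nat) : Int) := by
      simp only [List.length_cons]; push_cast; omega
    have hB : apply_grouping_alt (l0 :: ls) grouping
        = pvSplit [l0] (List.zip (ls.take m) (grouping.take m)) := by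
      unfold apply_grouping_alt
      simp only [hn]
      rw [show ((m + 1 : Nat) : Int) - 1 = ((m : Nat) : Int) from by push_cast; ring]
      rw [PySem.List.slice_to_natCast]
      rw [pvCuts_enum (grouping.take m) 0]
      rw [PySem.List.slice_from_one, List.tail_cons]
      rw [show (0 : Int) = ((0 : Nat) : Int) from rfl]
      exact pvB_core (grouping.take m) [l0] (ls.take m) (ls.drop m) (l0 :: ls) 0
        (((0 : Nat) : Int) + 1) ((m + 1 : Nat) : Int)
        (by simp)
        (by simp [hm])
        (by simp)
        (by simp [hm]; push_cast; omega)
    rw [hA, hB, pvZip_take ls grouping, ← hm]
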